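-- pv_equiv track=rewrite | github.com/levinkurian00/career-decision-companion | backend/decision_engine.py | determine_sector_from_quiz
-- ===== SOURCE A (Python) =====
-- def determine_sector_from_quiz(quiz_answers):
--     """
--     Determine best-fit sector based on abstract preference signals.
--     """
--
--     sector_scores = {
--         "Technology": 0,
--         "Finance": 0,
--         "Government Services": 0,
--         "Management & Business": 0
--     }
--
--     for q, value in quiz_answers.items():
--
--         if q == "q1":  # Financial Growth
--             sector_scores["Technology"] += value
--             sector_scores["Finance"] += value
--             sector_scores["Management & Business"] += value
--
--         elif q == "q2":  # Market Opportunity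
--             sector_scores["Technology"] += value
--             sector_scores["Finance"] += value
--
--         elif q == "q3":  # Challenge
--             sector_scores["Technology"] += value
--             sector_scores["Management & Business"] += value
--
--         elif q == "q4":  # Work-life balance
--             sector_scores["Government Services"] += value
--             sector_scores["Finance"] += value
--
--         elif q == "q5":  # Long-term growth
--             sector_scores["Technology"] += value
--             sector_scores["Management & Business"] += value
--
--         elif q == "q6":  # Intellectual stimulation
--             sector_scores["Technology"] += value
--             sector_scores["Finance"] += value
--
--     return max(sector_scores, key=sector_scores.get)
-- ===== SOURCE B (Python) =====
-- SECTOR_QUESTIONS = [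
--     ("Technology", ("q1", "q2", "q3", "q5", "q6")),
--     ("Finance", ("q1", "q2", "q4", "q6")),
--     ("Government Services", ("q4",)),
--     ("Management & Business", ("q1", "q3", "q5")),
-- ]
--
--
-- def determine_sector_from_quiz(quiz_answers):
--     """Gather per sector (instead of scattering per answer) and keep a running argmax."""
--     best_sector = None
--     best_score = None
--     for sector, questions in SECTOR_QUESTIONS:
--         score = sum(quiz_answers.get(q, 0) for q in questions)
--         if best_score is None or score > best_score:
--             best_sector, best_score = sector, score
--     return best_sector
-- ===== Notes on version B (the rewrite author's own statement) =====
-- stated objective: alternative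
-- what changed: B iterates over the four sectors, gathering each sector's score with quiz_answers.get over that sector's question list and keeping a running argmax, instead of A's per-answer scatter into a score dict followed by max(dict, key=dict.get).
import Mathlib
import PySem

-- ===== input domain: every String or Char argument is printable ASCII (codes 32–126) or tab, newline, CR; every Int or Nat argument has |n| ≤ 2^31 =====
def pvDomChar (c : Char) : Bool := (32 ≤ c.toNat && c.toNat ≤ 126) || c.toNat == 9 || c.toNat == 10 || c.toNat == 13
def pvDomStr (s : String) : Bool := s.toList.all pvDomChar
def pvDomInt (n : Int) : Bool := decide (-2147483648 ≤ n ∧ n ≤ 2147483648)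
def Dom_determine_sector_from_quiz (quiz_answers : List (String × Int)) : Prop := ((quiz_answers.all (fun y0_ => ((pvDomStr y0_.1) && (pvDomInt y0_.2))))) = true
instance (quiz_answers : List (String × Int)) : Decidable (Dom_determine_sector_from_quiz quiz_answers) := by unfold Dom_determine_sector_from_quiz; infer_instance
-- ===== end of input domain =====

-- B gathers per sector with dict.get instead of scattering each answer over sectors, and keeps a
-- running argmax instead of building a score dict and calling max (objective: alternative decomposition).

-- ===== PORT A =====
-- `sector_scores[s] += value` is `modify s 0 (· + value)` (the four keys are always present, so the
-- default 0 is never used); `max(sector_scores, key=sector_scores.get)` is `max?` over the keys with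
-- the value as key (keys are always present, so `.get` is `getD _ 0`; the dict is never empty, so
-- `.getD ""` of the resulting `some` is exact).
-- the body of A's `for q, value in quiz_answers.items():` loop
def pvStepA (d : PySem.Dict String Int) (qv : String × Int) : PySem.Dict String Int :=
  if qv.1 = "q1" then
    ((d.modify "Technology" 0 (· + qv.2)).modify "Finance" 0 (· + qv.2)).modify "Management & Business" 0 (· + qv.2)
  else if qv.1 = "q2" then
    (d.modify "Technology" 0 (· + qv.2)).modify "Finance" 0 (· + qv.2)
  else if qv.1 = "q3" then
    (d.modify "Technology" 0 (· + qv.2)).modify "Management & Business" 0 (· + qv.2)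
  else if qv.1 = "q4" then
    (d.modify "Government Services" 0 (· + qv.2)).modify "Finance" 0 (· + qv.2)
  else if qv.1 = "q5" then
    (d.modify "Technology" 0 (· + qv.2)).modify "Management & Business" 0 (· + qv.2)
  else if qv.1 = "q6" then
    (d.modify "Technology" 0 (· + qv.2)).modify "Finance" 0 (· + qv.2)
  else d

def determine_sector_from_quiz (quiz_answers : List (String × Int)) : String :=
  let sector_scores : PySem.Dict String Int :=
    PySem.Dict.mk [("Technology", 0), ("Finance", 0), ("Government Services", 0), ("Management & Business", 0)]
  let sector_scores := quiz_answers.foldl pvStepA sector_scores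
  (PySem.List.max? sector_scores.keys (fun k => sector_scores.getD k 0)).getD ""

-- ===== PORT B =====
def pvSectorQuestions : List (String × List String) :=
  [("Technology", ["q1", "q2", "q3", "q5", "q6"]),
   ("Finance", ["q1", "q2", "q4", "q6"]),
   ("Government Services", ["q4"]),
   ("Management & Business", ["q1", "q3", "q5"])]

-- the running (best_sector, best_score) pair; `best_score is None` is the `none` case,
-- `score > best_score` is `bs < score`; `quiz_answers.get(q, 0)` is `getD q 0` on the input dict.
def determine_sector_from_quiz_alt (quiz_answers : List (String × Int)) : String :=
  let d : PySem.Dict String Int := PySem.Dict.mk quiz_answers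
  (pvSectorQuestions.foldl (fun (best : String × Option Int) sq =>
      let score := (sq.2.map (fun q => d.getD q 0)).sum
      match best.2 with
      | none => (sq.1, some score)
      | some bs => if bs < score then (sq.1, some score) else best)
    ("", none)).1

-- ===== PRECONDITION & SPEC =====
-- Pre_ excludes lists with duplicate question keys: the Python parameter is a dict, so no dict
-- input corresponds to such a list (A's scatter loop and B's first-match .get would read a
-- duplicate-key list differently, but neither reading models any Python input).
def Pre_determine_sector_from_quiz (quiz_answers : List (String × Int)) : Prop :=
  (quiz_answers.map Prod.fst).Nodup
instance (quiz_answers : List (String × Int)) : Decidable (Pre_determine_sector_from_quiz quiz_answers) := by unfold Pre_determine_sector_from_quiz; infer_instance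
def pvWitness_determine_sector_from_quiz : (List (String × Int)) := [("q1", 3), ("q4", 5)]

def Spec_determine_sector_from_quiz (quiz_answers : List (String × Int)) (out : String) : Prop := out = determine_sector_from_quiz_alt quiz_answers
instance (quiz_answers : List (String × Int)) (out : String) : Decidable (Spec_determine_sector_from_quiz quiz_answers out) := by unfold Spec_determine_sector_from_quiz; infer_instance

-- ===== CLAIM (what is proved, stated in full; the proofs are below) =====
def Claim_equal_determine_sector_from_quiz : Prop := ∀ (quiz_answers : List (String × Int)), Dom_determine_sector_from_quiz quiz_answers → Pre_determine_sector_from_quiz quiz_answers → Spec_determine_sector_from_quiz quiz_answers (determine_sector_from_quiz quiz_answers)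

-- ===== LEMMAS AND PROOFS =====

-- the total contributed to one sector by the answers whose key lies in qs
def pvS (qs : List String) (l : List (String × Int)) : Int :=
  (l.map (fun kv => if kv.1 ∈ qs then kv.2 else 0)).sum

lemma pvS_cons (qs : List String) (k : String) (v : Int) (t : List (String × Int)) :
    pvS qs ((k, v) :: t) = (if k ∈ qs then v else 0) + pvS qs t := by
  simp [pvS]

lemma pvS_eq_zero_of_not_mem (q : String) (t : List (String × Int))
    (h : q ∉ t.map Prod.fst) : pvS [q] t = 0 := by
  induction t with
  | nil => rfl
  | cons p t ih =>
    obtain ⟨k, v⟩ := p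
    simp only [List.map_cons, List.mem_cons, not_or] at h
    rw [pvS_cons, ih h.2]
    simp [Ne.symm h.1]

lemma pvS_split (q : String) (qs : List String) (h : q ∉ qs) (l : List (String × Int)) :
    pvS (q :: qs) l = pvS [q] l + pvS qs l := by
  induction l with
  | nil => rfl
  | cons p t ih =>
    obtain ⟨k, v⟩ := p
    rw [pvS_cons, pvS_cons, pvS_cons, ih]
    by_cases hk : k = q
    · subst hk; simp [h]; ring
    · simp [hk]
      by_cases hm : k ∈ qs <;> simp [hm] <;> ring

lemma getD_mk_eq_pvS (q : String) (l : List (String × Int))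
    (h : (l.map Prod.fst).Nodup) : (PySem.Dict.mk l).getD q 0 = pvS [q] l := by
  induction l with
  | nil => simp [PySem.Dict.getD, PySem.Dict.get?, pvS]
  | cons p t ih =>
    obtain ⟨k, v⟩ := p
    simp only [List.map_cons, List.nodup_cons] at h
    rw [pvS_cons]
    by_cases hk : k = q
    · subst hk
      rw [pvS_eq_zero_of_not_mem k t h.1]
      simp [PySem.Dict.getD, PySem.Dict.get?]
    · rw [← ih h.2]
      simp [PySem.Dict.getD, PySem.Dict.get?, hk]

-- A's loop, with the four accumulators generalized: it computes the four pvS totals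
lemma pvStepA_lit (k : String) (v : Int) (a b c g : Int) :
    pvStepA (PySem.Dict.mk [("Technology", a), ("Finance", b), ("Government Services", c), ("Management & Business", g)]) (k, v)
    = PySem.Dict.mk [("Technology", a + (if k ∈ ["q1", "q2", "q3", "q5", "q6"] then v else 0)),
                     ("Finance", b + (if k ∈ ["q1", "q2", "q4", "q6"] then v else 0)),
                     ("Government Services", c + (if k ∈ ["q4"] then v else 0)),
                     ("Management & Business", g + (if k ∈ ["q1", "q3", "q5"] then v else 0))] := by
  by_cases h1 : k = "q1"
  · subst h1
    simp [pvStepA, PySem.Dict.modify, PySem.Dict.insert, PySem.Dict.getD, PySem.Dict.get?, PySem.Dict.contains]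
  · by_cases h2 : k = "q2"
    · subst h2
      simp [pvStepA, PySem.Dict.modify, PySem.Dict.insert, PySem.Dict.getD, PySem.Dict.get?, PySem.Dict.contains]
    · by_cases h3 : k = "q3"
      · subst h3
        simp [pvStepA, PySem.Dict.modify, PySem.Dict.insert, PySem.Dict.getD, PySem.Dict.get?, PySem.Dict.contains]
      · by_cases h4 : k = "q4"
        · subst h4
          simp [pvStepA, PySem.Dict.modify, PySem.Dict.insert, PySem.Dict.getD, PySem.Dict.get?, PySem.Dict.contains]
        · by_cases h5 : k = "q5"
          · subst h5
            simp [pvStepA, PySem.Dict.modify, PySem.Dict.insert, PySem.Dict.getD, PySem.Dict.get?, PySem.Dict.contains]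
          · by_cases h6 : k = "q6"
            · subst h6
              simp [pvStepA, PySem.Dict.modify, PySem.Dict.insert, PySem.Dict.getD, PySem.Dict.get?, PySem.Dict.contains]
            · simp [pvStepA, h1, h2, h3, h4, h5, h6]

lemma loopA (l : List (String × Int)) (a b c g : Int) :
    l.foldl pvStepA
      (PySem.Dict.mk [("Technology", a), ("Finance", b), ("Government Services", c), ("Management & Business", g)])
    = PySem.Dict.mk [("Technology", a + pvS ["q1", "q2", "q3", "q5", "q6"] l),
                     ("Finance", b + pvS ["q1", "q2", "q4", "q6"] l),
                     ("Government Services", c + pvS ["q4"] l),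
                     ("Management & Business", g + pvS ["q1", "q3", "q5"] l)] := by
  induction l generalizing a b c g with
  | nil => simp [pvS]
  | cons p t ih =>
    obtain ⟨k, v⟩ := p
    rw [List.foldl_cons, pvStepA_lit, ih, pvS_cons, pvS_cons, pvS_cons, pvS_cons]
    simp [add_assoc]

-- ===== VERDICT (by name: the statement is the Claim_ definition above) =====
theorem determine_sector_from_quiz_spec : Claim_equal_determine_sector_from_quiz := by
  intro qa _hdom hpre
  unfold Spec_determine_sector_from_quiz
  unfold Pre_determine_sector_from_quiz at hpre
  show determine_sector_from_quiz qa = determine_sector_from_quiz_alt qa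
  rw [determine_sector_from_quiz, determine_sector_from_quiz_alt]
  rw [loopA]
  simp only [pvSectorQuestions, List.foldl_cons, List.foldl_nil, List.map_cons, List.map_nil,
    List.sum_cons, List.sum_nil]
  rw [getD_mk_eq_pvS _ _ hpre, getD_mk_eq_pvS _ _ hpre, getD_mk_eq_pvS _ _ hpre,
      getD_mk_eq_pvS _ _ hpre, getD_mk_eq_pvS _ _ hpre, getD_mk_eq_pvS _ _ hpre]
  rw [pvS_split "q1" ["q2", "q3", "q5", "q6"] (by decide) qa,
      pvS_split "q2" ["q3", "q5", "q6"] (by decide) qa,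
      pvS_split "q3" ["q5", "q6"] (by decide) qa,
      pvS_split "q5" ["q6"] (by decide) qa,
      pvS_split "q1" ["q2", "q4", "q6"] (by decide) qa,
      pvS_split "q2" ["q4", "q6"] (by decide) qa,
      pvS_split "q4" ["q6"] (by decide) qa,
      pvS_split "q1" ["q3", "q5"] (by decide) qa,
      pvS_split "q3" ["q5"] (by decide) qa]
  generalize pvS ["q1"] qa = s1
  generalize pvS ["q2"] qa = s2
  generalize pvS ["q3"] qa = s3
  generalize pvS ["q4"] qa = s4
  generalize pvS ["q5"] qa = s5
  generalize pvS ["q6"] qa = s6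
  simp [PySem.List.max?, PySem.Dict.keys, PySem.Dict.getD, PySem.Dict.get?]
  split_ifs <;> simp_all <;> split_ifs <;> simp_all <;> ((try split_ifs <;> simp_all) <;> omega)
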